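-- pv_equiv track=rewrite | github.com/XaryLee/Controllable-Melody-Generation | MusicFrameworks.py | zero_process
-- ===== SOURCE A (Python) =====
-- def zero_process(section): # 处理一个section内部的休止符
--     '''
--     发现数据集内部有很多0，但实际音乐中应该处理为前一个音的延伸而不是休止
--     后续考虑到有间奏、弱起等，休止并不是完全无用的，还是做了保留
--     '''
--     section_new = []
--     for note in section:
--         pitch, duration = note
--         if pitch == 0 and len(section_new) > 0:
--             section_new[-1][1] += duration
--         else:
--             section_new.append([pitch, duration])
--
--     return section_new
-- ===== SOURCE B (Python) =====
-- def zero_process(section):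
--     # Recursive one-pass: carry the pending (pitch, duration) entry; a rest
--     # (pitch 0) extends the pending entry, a non-rest emits it and starts anew.
--     def go(notes, pitch, dur):
--         if not notes:
--             return [[pitch, dur]]
--         p, d = notes[0]
--         if p == 0:
--             return go(notes[1:], pitch, dur + d)
--         return [[pitch, dur]] + go(notes[1:], p, d)
--     if not section:
--         return []
--     p0, d0 = section[0]
--     return go(section[1:], p0, d0)
-- ===== Notes on version B (the rewrite author's own statement) =====
-- stated objective: alternative
-- what changed: Replaces A's accumulator list with in-place mutation of its last entry by a single-pass recursion that carries the pending [pitch,duration] entry and emits it when a non-rest note arrives.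
import Mathlib
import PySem

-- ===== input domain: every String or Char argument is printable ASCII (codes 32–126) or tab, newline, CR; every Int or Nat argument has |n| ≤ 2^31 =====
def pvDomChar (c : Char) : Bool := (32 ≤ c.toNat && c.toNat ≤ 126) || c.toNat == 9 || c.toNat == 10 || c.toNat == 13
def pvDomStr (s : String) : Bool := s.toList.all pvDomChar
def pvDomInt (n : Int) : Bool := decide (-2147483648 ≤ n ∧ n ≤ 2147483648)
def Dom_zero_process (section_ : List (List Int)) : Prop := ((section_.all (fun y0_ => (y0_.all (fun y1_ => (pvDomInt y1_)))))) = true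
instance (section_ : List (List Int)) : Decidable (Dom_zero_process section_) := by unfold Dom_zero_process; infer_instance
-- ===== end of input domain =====

-- B replaces A's append-then-mutate-last-entry accumulator with a single-pass
-- recursion carrying the pending [pitch,duration] entry (objective: alternative).


-- ===== PORT A =====
-- section_new[-1][1] += duration: add d to the second slot of the last entry
def pvBumpLast (acc : List (List Int)) (d : Int) : List (List Int) :=
  match acc with
  | [] => []
  | [e] => [match e with | [p, dur] => [p, dur + d] | x => x]
  | x :: xs => x :: pvBumpLast xs d

def zero_process (section_ : List (List Int)) : List (List Int) :=
  section_.foldl (fun acc note =>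
    match note with
    | [pitch, duration] =>
      if pitch = 0 ∧ 0 < acc.length then pvBumpLast acc duration
      else acc ++ [[pitch, duration]]
    | _ => acc  -- 'pitch, duration = note' raises on this shape; excluded by Pre_
    ) []

-- ===== PORT B =====
def zpGo (notes : List (List Int)) (pitch : Int) (dur : Int) : List (List Int) :=
  match notes with
  | [] => [[pitch, dur]]
  | note :: rest =>
    match note with
    | [p, d] =>
      if p = 0 then zpGo rest pitch (dur + d)
      else [[pitch, dur]] ++ zpGo rest p d
    | _ => []  -- 'p, d = notes[0]' raises on this shape; excluded by Pre_

def zero_process_alt (section_ : List (List Int)) : List (List Int) :=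
  match section_ with
  | [] => []
  | note :: rest =>
    match note with
    | [p0, d0] => zpGo rest p0 d0
    | _ => []  -- unpack raises; excluded by Pre_

-- ===== PRECONDITION & SPEC =====
-- Pre_ excludes exactly the inputs where Python A raises: 'pitch, duration = note'
-- needs every note to have exactly two elements (ValueError otherwise).
def Pre_zero_process (section_ : List (List Int)) : Prop :=
  ∀ note ∈ section_, note.length = 2
instance (section_ : List (List Int)) : Decidable (Pre_zero_process section_) := by
  unfold Pre_zero_process; infer_instance

def pvWitness_zero_process : List (List Int) := [[60, 2], [0, 1], [62, 4], [0, 2], [0, 1]]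

def Spec_zero_process (section_ : List (List Int)) (out : List (List Int)) : Prop := out = zero_process_alt section_
instance (section_ : List (List Int)) (out : List (List Int)) : Decidable (Spec_zero_process section_ out) := by unfold Spec_zero_process; infer_instance

-- ===== CLAIM (what is proved, stated in full; the proofs are below) =====
def Claim_equal_zero_process : Prop := ∀ (section_ : List (List Int)), Dom_zero_process section_ → Pre_zero_process section_ → Spec_zero_process section_ (zero_process section_)

-- ===== LEMMAS AND PROOFS =====

theorem pvBumpLast_append (front : List (List Int)) (p dur d : Int) :
    pvBumpLast (front ++ [[p, dur]]) d = front ++ [[p, dur + d]] := by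
  induction front with
  | nil => rfl
  | cons x xs ih =>
    cases xs with
    | nil => simp [pvBumpLast]
    | cons y ys => simpa [pvBumpLast] using ih

theorem zp_fold_go (notes : List (List Int)) (front : List (List Int)) (pitch dur : Int)
    (h : ∀ note ∈ notes, note.length = 2) :
    notes.foldl (fun acc note =>
      match note with
      | [p, d] =>
        if p = 0 ∧ 0 < acc.length then pvBumpLast acc d
        else acc ++ [[p, d]]
      | _ => acc) (front ++ [[pitch, dur]])
    = front ++ zpGo notes pitch dur := by
  induction notes generalizing front pitch dur with
  | nil => simp [zpGo]
  | cons note rest ih =>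
    have hn : note.length = 2 := h note (List.mem_cons_self ..)
    have hr : ∀ x ∈ rest, x.length = 2 := fun x hx => h x (List.mem_cons_of_mem _ hx)
    match note, hn with
    | [p, d], _ =>
      by_cases hp : p = 0
      · subst hp
        simp only [List.foldl_cons, zpGo, true_and, if_true]
        rw [if_pos (show 0 < (front ++ [[pitch, dur]]).length by simp), pvBumpLast_append]
        exact ih front pitch (dur + d) hr
      · simp only [List.foldl_cons, zpGo, if_neg hp]
        rw [if_neg (by simp [hp])]
        rw [List.append_assoc] at *
        simpa using ih (front ++ [[pitch, dur]]) p d hr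

-- ===== VERDICT (by name: the statement is the Claim_ definition above) =====
theorem zero_process_spec : Claim_equal_zero_process := by
  intro section_ _hdom hpre
  unfold Spec_zero_process
  cases section_ with
  | nil => rfl
  | cons note rest =>
    have hn : note.length = 2 := hpre note (List.mem_cons_self ..)
    have hr : ∀ x ∈ rest, x.length = 2 := fun x hx => hpre x (List.mem_cons_of_mem _ hx)
    match note, hn with
    | [p, d], _ =>
      show List.foldl _ [] ([p, d] :: rest) = zero_process_alt ([p, d] :: rest)
      unfold zero_process_alt
      simp only [List.foldl_cons]
      rw [show (if p = 0 ∧ 0 < ([] : List (List Int)).length then pvBumpLast [] d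
              else [] ++ [[p, d]]) = [] ++ [[p, d]] from by simp]
      exact zp_fold_go rest [] p d hr
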